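-- pv_equiv track=rewrite | github.com/jacksonkunde/misaligned-nanoGPT | utils.py | generate_all_encryptions
-- ===== SOURCE A (Python) =====
-- import itertools
--
-- def generate_all_encryptions(input, mapping):
--     # get all possible encryptions
--     all_encryptions = []
--     for word in input.split():
--         if word in mapping:
--             all_encryptions.append(mapping[word])
--         else:
--             all_encryptions.append([word])
--
--     # get all possible combinations
--     all_combinations = list(itertools.product(*all_encryptions))
--
--     # convert to strings
--     all_encryptions = []
--     for combination in all_combinations:
--         all_encryptions.append(" ".join(combination))
--
--     return all_encryptions
-- ===== SOURCE B (Python) =====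
-- def generate_all_encryptions(input, mapping):
--     words = input.split()
--     if not words:
--         return ['']
--     first = words[0]
--     partial = list(mapping[first]) if first in mapping else [first]
--     for word in words[1:]:
--         options = mapping[word] if word in mapping else [word]
--         partial = [r + ' ' + opt for r in partial for opt in options]
--     return partial
-- ===== Notes on version B (the rewrite author's own statement) =====
-- stated objective: alternative
-- what changed: Drops itertools.product and the separate join pass: B folds left over the words, keeping a running list of already-joined partial strings and extending each with the current word's options, so the Cartesian product and the space-join are fused into one incremental pass.
import Mathlib
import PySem

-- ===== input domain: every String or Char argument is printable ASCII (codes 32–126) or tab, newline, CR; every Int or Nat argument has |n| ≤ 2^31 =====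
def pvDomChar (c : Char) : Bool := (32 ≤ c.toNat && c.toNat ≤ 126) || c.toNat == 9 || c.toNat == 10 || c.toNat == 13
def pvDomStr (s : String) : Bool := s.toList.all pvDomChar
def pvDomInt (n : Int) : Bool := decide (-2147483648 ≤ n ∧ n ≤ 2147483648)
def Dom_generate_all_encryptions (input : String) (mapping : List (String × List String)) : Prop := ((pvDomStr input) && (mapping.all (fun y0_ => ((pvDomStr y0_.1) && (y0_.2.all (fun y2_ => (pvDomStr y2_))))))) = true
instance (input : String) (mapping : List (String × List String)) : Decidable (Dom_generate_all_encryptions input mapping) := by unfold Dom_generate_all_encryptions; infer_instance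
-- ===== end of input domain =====

-- B fuses itertools.product and the space-join into one left fold over the words,
-- maintaining a running list of already-joined partial strings (alternative decomposition, same cost).
-- ===== PORT A =====
-- itertools.product(*lists): first list varies slowest, last fastest.
def pyProduct : List (List String) → List (List String)
  | [] => [[]]
  | l :: ls => l.flatMap (fun x => (pyProduct ls).map (fun r => x :: r))

def generate_all_encryptions (input : String) (mapping : List (String × List String)) : List String :=
  -- first loop: per-word option lists
  let all_encryptions := (PySem.Str.split₀ input).foldl
    (fun acc word =>
      match mapping.lookup word with   -- 'word in mapping' / 'mapping[word]' (dict: first match)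
      | some v => acc ++ [v]
      | none => acc ++ [[word]]) []
  -- all combinations, then the join loop
  let all_combinations := pyProduct all_encryptions
  all_combinations.foldl (fun acc c => acc ++ [PySem.Str.join " " c]) []

-- ===== PORT B =====
def pvOpts (mapping : List (String × List String)) (word : String) : List String :=
  match mapping.lookup word with
  | some v => v
  | none => [word]

def generate_all_encryptions_alt (input : String) (mapping : List (String × List String)) : List String :=
  match PySem.Str.split₀ input with
  | [] => [""]
  | w :: ws =>
    ws.foldl
      (fun parts word => parts.flatMap (fun r => (pvOpts mapping word).map (fun o => r ++ " " ++ o)))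
      (pvOpts mapping w)

-- ===== PRECONDITION & SPEC =====
def Spec_generate_all_encryptions (input : String) (mapping : List (String × List String)) (out : List String) : Prop := out = generate_all_encryptions_alt input mapping
instance (input : String) (mapping : List (String × List String)) (out : List String) : Decidable (Spec_generate_all_encryptions input mapping out) := by unfold Spec_generate_all_encryptions; infer_instance

-- ===== CLAIM (what is proved, stated in full; the proofs are below) =====
def Claim_equal_generate_all_encryptions : Prop := ∀ (input : String) (mapping : List (String × List String)), Dom_generate_all_encryptions input mapping → Spec_generate_all_encryptions input mapping (generate_all_encryptions input mapping)

-- ===== LEMMAS AND PROOFS =====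

-- the concatenation of " " ++ o over a suffix of options
def pvSJoin : List String → String
  | [] => ""
  | x :: t => " " ++ x ++ pvSJoin t

theorem pvJoin_eq (x : String) (t : List String) :
    PySem.Str.join " " (x :: t) = x ++ pvSJoin t := by
  induction t generalizing x with
  | nil =>
    apply String.toList_injective
    simp [PySem.Str.toList_join, PySem.Chars.join_singleton, pvSJoin]
  | cons y t ih =>
    apply String.toList_injective
    have h := congrArg String.toList (ih y)
    simp only [PySem.Str.toList_join, List.map_cons, pvSJoin, String.toList_append] at h ⊢
    rw [PySem.Chars.join_cons_cons, h]
    simp [List.append_assoc]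

theorem pvFoldl_append_map {α β : Type} (f : α → β) (l : List α) (acc : List β) :
    l.foldl (fun acc c => acc ++ [f c]) acc = acc ++ l.map f := by
  induction l generalizing acc with
  | nil => simp
  | cons x t ih => simp [List.foldl_cons, ih, List.append_assoc]

theorem pvOptionLists (mapping : List (String × List String)) (ws : List String)
    (acc : List (List String)) :
    ws.foldl (fun acc word =>
      match mapping.lookup word with
      | some v => acc ++ [v]
      | none => acc ++ [[word]]) acc = acc ++ ws.map (pvOpts mapping) := by
  induction ws generalizing acc with
  | nil => simp
  | cons w t ih =>
    simp only [List.foldl_cons, List.map_cons]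
    rw [ih]
    cases h : mapping.lookup w <;> simp [pvOpts, h, List.append_assoc]

theorem pvMainFold (mapping : List (String × List String)) (ws : List String)
    (P : List String) :
    ws.foldl
      (fun parts word => parts.flatMap (fun r => (pvOpts mapping word).map (fun o => r ++ " " ++ o)))
      P
    = P.flatMap (fun r => (pyProduct (ws.map (pvOpts mapping))).map (fun c => r ++ pvSJoin c)) := by
  induction ws generalizing P with
  | nil => simp [pyProduct, pvSJoin]
  | cons w t ih =>
    simp only [List.foldl_cons, List.map_cons]
    rw [ih]
    simp only [pyProduct, List.flatMap_assoc, List.flatMap_map, List.map_flatMap, List.map_map]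
    congr 1
    funext r
    congr 1
    funext o
    congr 1
    funext c
    simp [pvSJoin, String.append_assoc]

-- ===== VERDICT (by name: the statement is the Claim_ definition above) =====
theorem generate_all_encryptions_spec : Claim_equal_generate_all_encryptions := by
  intro input mapping _
  unfold Spec_generate_all_encryptions generate_all_encryptions generate_all_encryptions_alt
  simp only
  rw [pvOptionLists, List.nil_append, pvFoldl_append_map, List.nil_append]
  cases h : PySem.Str.split₀ input with
  | nil => rfl
  | cons w ws =>
    show List.map (PySem.Str.join " ") (pyProduct (List.map (pvOpts mapping) (w :: ws))) =
      List.foldl (fun parts word => parts.flatMap (fun r => (pvOpts mapping word).map (fun o => r ++ " " ++ o)))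
        (pvOpts mapping w) ws
    rw [pvMainFold]
    simp only [List.map_cons, pyProduct, List.map_flatMap, List.map_map]
    congr 1
    funext x
    congr 1
    funext c
    simp only [Function.comp]
    exact pvJoin_eq x c
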